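-- pv_equiv track=rewrite | github.com/arnav-verma200/webbrowser | browser.py | expand_shorthand
-- ===== SOURCE A (Python) =====
-- def expand_shorthand(prop, val):
--   """Expand shorthand properties into individual properties"""
--   expanded = {}
--
--   if prop == "font":
--     # font: [style] [weight] size [family]
--     # Examples: "italic bold 100% Times", "bold 16px Arial"
--     parts = val.split()
--
--     # Defaults
--     style = "normal"
--     weight = "normal"
--     size = None
--
--     for part in parts:
--       # Check for font-style
--       if part in ["italic", "oblique", "normal"]:
--         style = part
--       # Check for font-weight
--       elif part in ["bold", "bolder", "lighter", "normal"] or part.isdigit():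
--         weight = part
--       # Check for font-size (contains px, %, em, or is a number followed by unit)
--       elif any(unit in part for unit in ["px", "%", "em", "pt", "rem"]):
--         size = part
--       # Anything else is treated as font-family (we'll ignore for now)
--
--     # Only set properties if we found a valid size
--     if size:
--       expanded["font-style"] = style
--       expanded["font-weight"] = weight
--       expanded["font-size"] = size
--
--     else:
--       #invalid font shorthand, dont expand
--       pass
--
--   elif prop == "margin":
--     # margin: top [right] [bottom] [left]
--     parts = val.split()
--     if len(parts) == 1:
--       # All sides
--       expanded["margin-top"] = parts[0]
--       expanded["margin-right"] = parts[0]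
--       expanded["margin-bottom"] = parts[0]
--       expanded["margin-left"] = parts[0]
--     elif len(parts) == 2:
--       # top/bottom, left/right
--       expanded["margin-top"] = parts[0]
--       expanded["margin-bottom"] = parts[0]
--       expanded["margin-right"] = parts[1]
--       expanded["margin-left"] = parts[1]
--     elif len(parts) == 3:
--       # top, left/right, bottom
--       expanded["margin-top"] = parts[0]
--       expanded["margin-right"] = parts[1]
--       expanded["margin-left"] = parts[1]
--       expanded["margin-bottom"] = parts[2]
--     elif len(parts) == 4:
--       # top, right, bottom, left (clockwise)
--       expanded["margin-top"] = parts[0]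
--       expanded["margin-right"] = parts[1]
--       expanded["margin-bottom"] = parts[2]
--       expanded["margin-left"] = parts[3]
--
--   elif prop == "padding":
--     # padding: same logic as margin
--     parts = val.split()
--     if len(parts) == 1:
--       expanded["padding-top"] = parts[0]
--       expanded["padding-right"] = parts[0]
--       expanded["padding-bottom"] = parts[0]
--       expanded["padding-left"] = parts[0]
--     elif len(parts) == 2:
--       expanded["padding-top"] = parts[0]
--       expanded["padding-bottom"] = parts[0]
--       expanded["padding-right"] = parts[1]
--       expanded["padding-left"] = parts[1]
--     elif len(parts) == 3:
--       expanded["padding-top"] = parts[0]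
--       expanded["padding-right"] = parts[1]
--       expanded["padding-left"] = parts[1]
--       expanded["padding-bottom"] = parts[2]
--     elif len(parts) == 4:
--       expanded["padding-top"] = parts[0]
--       expanded["padding-right"] = parts[1]
--       expanded["padding-bottom"] = parts[2]
--       expanded["padding-left"] = parts[3]
--
--   else:
--     # Not a shorthand property, return as-is
--     expanded[prop] = val
--
--   return expanded
-- ===== SOURCE B (Python) =====
-- STYLES = ("italic", "oblique", "normal")
-- WEIGHTS = ("bold", "bolder", "lighter", "normal")
-- UNITS = ("px", "%", "em", "pt", "rem")
-- # number of tokens -> (side, source index) in A's insertion order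
-- TABLE = {
--     1: [("top", 0), ("right", 0), ("bottom", 0), ("left", 0)],
--     2: [("top", 0), ("bottom", 0), ("right", 1), ("left", 1)],
--     3: [("top", 0), ("right", 1), ("left", 1), ("bottom", 2)],
--     4: [("top", 0), ("right", 1), ("bottom", 2), ("left", 3)],
-- }
--
-- def _is_weight(p):
--     return p not in STYLES and (p in WEIGHTS or p.isdigit())
--
-- def _is_size(p):
--     return (p not in STYLES and not (p in WEIGHTS or p.isdigit())
--             and any(u in p for u in UNITS))
--
-- def expand_shorthand(prop, val):
--     if prop == "font":
--         parts = val.split()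
--         styles = [p for p in parts if p in STYLES]
--         weights = [p for p in parts if _is_weight(p)]
--         sizes = [p for p in parts if _is_size(p)]
--         if not sizes:
--             return {}
--         return {
--             "font-style": styles[-1] if styles else "normal",
--             "font-weight": weights[-1] if weights else "normal",
--             "font-size": sizes[-1],
--         }
--     if prop in ("margin", "padding"):
--         parts = val.split()
--         return {prop + "-" + side: parts[i]
--                 for side, i in TABLE.get(len(parts), [])}
--     return {prop: val}
-- ===== Notes on version B (the rewrite author's own statement) =====
-- stated objective: simpler
-- what changed: The two identical four-way margin/padding if-chains are collapsed into one table-driven pass (token-count -> (side, index) list), and the stateful font classification loop is replaced by three per-category filters taking the last match.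
import Mathlib
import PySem

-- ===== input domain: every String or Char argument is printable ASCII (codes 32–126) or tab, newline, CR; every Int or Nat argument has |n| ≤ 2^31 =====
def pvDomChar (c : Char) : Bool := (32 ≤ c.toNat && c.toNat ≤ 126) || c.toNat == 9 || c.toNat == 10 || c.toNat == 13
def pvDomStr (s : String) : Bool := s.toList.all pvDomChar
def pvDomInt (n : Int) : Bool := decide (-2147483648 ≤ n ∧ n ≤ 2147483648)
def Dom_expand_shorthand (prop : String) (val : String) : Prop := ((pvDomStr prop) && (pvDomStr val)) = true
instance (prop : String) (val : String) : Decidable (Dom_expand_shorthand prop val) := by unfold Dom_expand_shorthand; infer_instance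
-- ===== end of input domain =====

-- B replaces A's two identical four-way margin/padding cascades by one table-driven
-- emission pass and A's stateful font classification loop by per-category filters
-- (objective: simpler; same asymptotic cost).

-- ===== PORT A =====
-- the body of A's `for part in parts` loop (state = (style, weight, size))
def pvFontStep (st : String × String × Option String) (part : String) :
    String × String × Option String :=
  if (["italic", "oblique", "normal"].contains part) then
    (part, st.2.1, st.2.2)
  else if (["bold", "bolder", "lighter", "normal"].contains part || PySem.Str.strIsdigit part) then
    (st.1, part, st.2.2)
  else if (["px", "%", "em", "pt", "rem"].any (fun u => PySem.Str.isIn u part)) then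
    (st.1, st.2.1, some part)
  else st

def expand_shorthand (prop : String) (val : String) : List (String × String) :=
  let expanded : PySem.Dict String String := PySem.Dict.empty
  if prop == "font" then
    let parts := PySem.Str.split₀ val
    let st := parts.foldl pvFontStep ("normal", "normal", none)
    -- `if size:` — size is None or a whitespace-split token (never ""), so = isSome
    match st.2.2 with
    | some s =>
      (((expanded.insert "font-style" st.1).insert "font-weight" st.2.1).insert "font-size" s).items
    | none => expanded.items
  else if prop == "margin" then
    let parts := PySem.Str.split₀ val
    if parts.length == 1 then
      ((((expanded.insert "margin-top" (parts.getD 0 "")).insert "margin-right" (parts.getD 0 "")).insert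
          "margin-bottom" (parts.getD 0 "")).insert "margin-left" (parts.getD 0 "")).items
    else if parts.length == 2 then
      ((((expanded.insert "margin-top" (parts.getD 0 "")).insert "margin-bottom" (parts.getD 0 "")).insert
          "margin-right" (parts.getD 1 "")).insert "margin-left" (parts.getD 1 "")).items
    else if parts.length == 3 then
      ((((expanded.insert "margin-top" (parts.getD 0 "")).insert "margin-right" (parts.getD 1 "")).insert
          "margin-left" (parts.getD 1 "")).insert "margin-bottom" (parts.getD 2 "")).items
    else if parts.length == 4 then
      ((((expanded.insert "margin-top" (parts.getD 0 "")).insert "margin-right" (parts.getD 1 "")).insert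
          "margin-bottom" (parts.getD 2 "")).insert "margin-left" (parts.getD 3 "")).items
    else expanded.items
  else if prop == "padding" then
    let parts := PySem.Str.split₀ val
    if parts.length == 1 then
      ((((expanded.insert "padding-top" (parts.getD 0 "")).insert "padding-right" (parts.getD 0 "")).insert
          "padding-bottom" (parts.getD 0 "")).insert "padding-left" (parts.getD 0 "")).items
    else if parts.length == 2 then
      ((((expanded.insert "padding-top" (parts.getD 0 "")).insert "padding-bottom" (parts.getD 0 "")).insert
          "padding-right" (parts.getD 1 "")).insert "padding-left" (parts.getD 1 "")).items
    else if parts.length == 3 then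
      ((((expanded.insert "padding-top" (parts.getD 0 "")).insert "padding-right" (parts.getD 1 "")).insert
          "padding-left" (parts.getD 1 "")).insert "padding-bottom" (parts.getD 2 "")).items
    else if parts.length == 4 then
      ((((expanded.insert "padding-top" (parts.getD 0 "")).insert "padding-right" (parts.getD 1 "")).insert
          "padding-bottom" (parts.getD 2 "")).insert "padding-left" (parts.getD 3 "")).items
    else expanded.items
  else
    (expanded.insert prop val).items

-- ===== PORT B =====
def pvStyles : List String := ["italic", "oblique", "normal"]
def pvWeights : List String := ["bold", "bolder", "lighter", "normal"]
def pvUnits : List String := ["px", "%", "em", "pt", "rem"]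

def pvIsWeight (p : String) : Bool :=
  !pvStyles.contains p && (pvWeights.contains p || PySem.Str.strIsdigit p)

def pvIsSize (p : String) : Bool :=
  !pvStyles.contains p && !(pvWeights.contains p || PySem.Str.strIsdigit p)
    && pvUnits.any (fun u => PySem.Str.isIn u p)

-- number of tokens ↦ (side, source index) in emission order
def pvTable : List (Nat × List (String × Nat)) :=
  [ (1, [("top", 0), ("right", 0), ("bottom", 0), ("left", 0)]),
    (2, [("top", 0), ("bottom", 0), ("right", 1), ("left", 1)]),
    (3, [("top", 0), ("right", 1), ("left", 1), ("bottom", 2)]),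
    (4, [("top", 0), ("right", 1), ("bottom", 2), ("left", 3)]) ]

def expand_shorthand_alt (prop : String) (val : String) : List (String × String) :=
  if prop == "font" then
    let parts := PySem.Str.split₀ val
    let styles := parts.filter (fun p => pvStyles.contains p)
    let weights := parts.filter pvIsWeight
    let sizes := parts.filter pvIsSize
    if sizes.isEmpty then []
    else
      [("font-style", styles.getLastD "normal"),
       ("font-weight", weights.getLastD "normal"),
       ("font-size", sizes.getLastD "")]
  else if prop == "margin" || prop == "padding" then
    let parts := PySem.Str.split₀ val
    ((pvTable.lookup parts.length).getD []).map
      (fun si => (prop ++ "-" ++ si.1, parts.getD si.2 ""))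
  else [(prop, val)]

-- ===== PRECONDITION & SPEC =====
def Spec_expand_shorthand (prop : String) (val : String) (out : List (String × String)) : Prop := out = expand_shorthand_alt prop val
instance (prop : String) (val : String) (out : List (String × String)) : Decidable (Spec_expand_shorthand prop val out) := by unfold Spec_expand_shorthand; infer_instance

-- ===== CLAIM (what is proved, stated in full; the proofs are below) =====
def Claim_equal_expand_shorthand : Prop := ∀ (prop : String) (val : String), Dom_expand_shorthand prop val → Spec_expand_shorthand prop val (expand_shorthand prop val)

-- ===== LEMMAS AND PROOFS =====

lemma pvOr_getLast?_cons {α : Type} (l : List α) (p : α) (z : Option α) :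
    ((p :: l).getLast?).or z = (l.getLast?).or (some p) := by
  induction l generalizing p with
  | nil => rfl
  | cons q qs ih =>
    rw [List.getLast?_cons_cons]
    cases h : (q :: qs).getLast? with
    | none => simp at h
    | some x => rfl

-- A's font loop computes exactly B's three per-category filters
lemma pvFontLoop (parts : List String) :
    ∀ (s w : String) (z : Option String),
      parts.foldl pvFontStep (s, w, z) =
        ((parts.filter (fun p => pvStyles.contains p)).getLastD s,
         (parts.filter pvIsWeight).getLastD w,
         ((parts.filter pvIsSize).getLast?).or z) := by
  induction parts with
  | nil => intro s w z; rfl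
  | cons p ps ih =>
    intro s w z
    rw [List.foldl_cons]
    by_cases h1 : pvStyles.contains p = true
    · have hw : pvIsWeight p = false := by unfold pvIsWeight; rw [h1]; rfl
      have hz : pvIsSize p = false := by unfold pvIsSize; rw [h1]; rfl
      have hstep : pvFontStep (s, w, z) p = (p, w, z) := by
        unfold pvFontStep; rw [show (["italic", "oblique", "normal"].contains p) = true from h1]
        rfl
      rw [hstep, ih, List.filter_cons, List.filter_cons, List.filter_cons, h1, hw, hz]
      simp only [if_true, Bool.false_eq_true, if_false, List.getLastD_cons]
    · rw [Bool.not_eq_true] at h1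
      by_cases h2 : (pvWeights.contains p || PySem.Str.strIsdigit p) = true
      · have hw : pvIsWeight p = true := by unfold pvIsWeight; rw [h1, h2]; rfl
        have hz : pvIsSize p = false := by unfold pvIsSize; rw [h1, h2]; rfl
        have hstep : pvFontStep (s, w, z) p = (s, p, z) := by
          unfold pvFontStep
          rw [show (["italic", "oblique", "normal"].contains p) = false from h1,
            show (["bold", "bolder", "lighter", "normal"].contains p
                  || PySem.Str.strIsdigit p) = true from h2]
          rfl
        rw [hstep, ih, List.filter_cons, List.filter_cons, List.filter_cons, h1, hw, hz]
        simp only [if_true, Bool.false_eq_true, if_false, List.getLastD_cons]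
      · rw [Bool.not_eq_true] at h2
        by_cases h3 : (pvUnits.any (fun u => PySem.Str.isIn u p)) = true
        · have hw : pvIsWeight p = false := by unfold pvIsWeight; rw [h1, h2]; rfl
          have hz : pvIsSize p = true := by unfold pvIsSize; rw [h1, h2, h3]; rfl
          have hstep : pvFontStep (s, w, z) p = (s, w, some p) := by
            unfold pvFontStep
            rw [show (["italic", "oblique", "normal"].contains p) = false from h1,
              show (["bold", "bolder", "lighter", "normal"].contains p
                    || PySem.Str.strIsdigit p) = false from h2,
              show (["px", "%", "em", "pt", "rem"].any (fun u => PySem.Str.isIn u p)) = true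
                from h3]
            rfl
          rw [hstep, ih, List.filter_cons, List.filter_cons, List.filter_cons, h1, hw, hz]
          simp only [if_true, Bool.false_eq_true, if_false, pvOr_getLast?_cons]
        · rw [Bool.not_eq_true] at h3
          have hw : pvIsWeight p = false := by unfold pvIsWeight; rw [h1, h2]; rfl
          have hz : pvIsSize p = false := by unfold pvIsSize; rw [h3]; simp
          have hstep : pvFontStep (s, w, z) p = (s, w, z) := by
            unfold pvFontStep
            rw [show (["italic", "oblique", "normal"].contains p) = false from h1,
              show (["bold", "bolder", "lighter", "normal"].contains p
                    || PySem.Str.strIsdigit p) = false from h2,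
              show (["px", "%", "em", "pt", "rem"].any (fun u => PySem.Str.isIn u p)) = false
                from h3]
            rfl
          rw [hstep, ih, List.filter_cons, List.filter_cons, List.filter_cons, h1, hw, hz]
          simp only [Bool.false_eq_true, if_false]

lemma pvFontCase (val : String) :
    expand_shorthand "font" val = expand_shorthand_alt "font" val := by
  show (match (List.foldl pvFontStep ("normal", "normal", none) (PySem.Str.split₀ val)).2.2 with
        | some s =>
          ((((PySem.Dict.empty.insert "font-style"
              (List.foldl pvFontStep ("normal", "normal", none) (PySem.Str.split₀ val)).1).insert
              "font-weight"
              (List.foldl pvFontStep ("normal", "normal", none) (PySem.Str.split₀ val)).2.1).insert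
              "font-size" s).items)
        | none => (PySem.Dict.empty : PySem.Dict String String).items) = _
  rw [pvFontLoop]
  show _ = (if ((PySem.Str.split₀ val).filter pvIsSize).isEmpty then [] else _)
  cases h : (PySem.Str.split₀ val).filter pvIsSize with
  | nil => rfl
  | cons x xs =>
    simp only [List.isEmpty_cons, Option.or_none, Bool.false_eq_true, if_false,
      show (x :: xs).getLast? = some ((x :: xs).getLastD "") by
        rw [List.getLastD_eq_getLast?]; cases hl : (x :: xs).getLast? with
        | none => simp at hl
        | some y => rfl]
    rfl

lemma pvSideCase (q : String) (val : String) (hq : q = "margin" ∨ q = "padding") :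
    expand_shorthand q val = expand_shorthand_alt q val := by
  rcases hq with hq | hq <;> subst hq <;>
  · cases hp : PySem.Str.split₀ val with
    | nil => simp only [expand_shorthand, expand_shorthand_alt, hp]; rfl
    | cons a t1 => cases t1 with
      | nil => simp only [expand_shorthand, expand_shorthand_alt, hp]; rfl
      | cons b t2 => cases t2 with
        | nil => simp only [expand_shorthand, expand_shorthand_alt, hp]; rfl
        | cons c t3 => cases t3 with
          | nil => simp only [expand_shorthand, expand_shorthand_alt, hp]; rfl
          | cons d t4 => cases t4 with
            | nil => simp only [expand_shorthand, expand_shorthand_alt, hp]; rfl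
            | cons e t5 => simp only [expand_shorthand, expand_shorthand_alt, hp]; rfl

-- ===== VERDICT (by name: the statement is the Claim_ definition above) =====
theorem expand_shorthand_spec : Claim_equal_expand_shorthand := by
  intro prop val _
  unfold Spec_expand_shorthand
  by_cases h1 : prop = "font"
  · subst h1; exact pvFontCase val
  · by_cases h2 : prop = "margin" ∨ prop = "padding"
    · exact pvSideCase prop val h2
    · rw [not_or] at h2
      simp only [expand_shorthand, expand_shorthand_alt,
        show (prop == "font") = false by simpa using h1,
        show (prop == "margin") = false by simpa using h2.1,
        show (prop == "padding") = false by simpa using h2.2]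
      rfl
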